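-- pv_equiv track=rewrite | github.com/echo636/CareerMatch | backend/app/job_seed_loader.py | _unescape_postgres_copy_text
-- ===== SOURCE A (Python) =====
-- def _unescape_postgres_copy_text(value: str) -> str:
--     result: list[str] = []
--     index = 0
--     while index < len(value):
--         char = value[index]
--         if char != "\\":
--             result.append(char)
--             index += 1
--             continue
--
--         index += 1
--         if index >= len(value):
--             result.append("\\")
--             break
--
--         escaped = value[index]
--         if escaped in "01234567":
--             octal_digits = [escaped]
--             for offset in range(1, 3):
--                 if index + offset >= len(value):
--                     break
--                 candidate = value[index + offset]
--                 if candidate not in "01234567":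
--                     break
--                 octal_digits.append(candidate)
--             result.append(chr(int("".join(octal_digits), 8)))
--             index += len(octal_digits)
--             continue
--
--         mapping = {
--             "b": "\b",
--             "f": "\f",
--             "n": "\n",
--             "r": "\r",
--             "t": "\t",
--             "v": "\v",
--             "\\": "\\",
--         }
--         result.append(mapping.get(escaped, escaped))
--         index += 1
--     return "".join(result)
-- ===== SOURCE B (Python) =====
-- _MAP = {"b": "\b", "f": "\f", "n": "\n", "r": "\r", "t": "\t", "v": "\v", "\\": "\\"}
--
-- def _unescape_postgres_copy_text(value: str) -> str:
--     # chunkwise: copy runs up to the next backslash with find/slices instead of char-by-char indexing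
--     out = []
--     while True:
--         j = value.find("\\")
--         if j < 0:
--             out.append(value)
--             break
--         out.append(value[:j])
--         rest = value[j + 1:]
--         digits = ""
--         for c in rest[:3]:
--             if c not in "01234567":
--                 break
--             digits += c
--         if digits:
--             out.append(chr(int(digits, 8)))
--             value = rest[len(digits):]
--         elif rest:
--             out.append(_MAP.get(rest[0], rest[0]))
--             value = rest[1:]
--         else:
--             out.append("\\")
--             break
--     return "".join(out)
-- ===== Notes on version B (the rewrite author's own statement) =====
-- stated objective: faster
-- what changed: Replaces the char-by-char index loop (with manual index bookkeeping and a nested offset loop for octal digits) by a chunkwise scanner that copies whole backslash-free runs with find/slices and reads the octal run with a bounded take-while.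
import Mathlib
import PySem

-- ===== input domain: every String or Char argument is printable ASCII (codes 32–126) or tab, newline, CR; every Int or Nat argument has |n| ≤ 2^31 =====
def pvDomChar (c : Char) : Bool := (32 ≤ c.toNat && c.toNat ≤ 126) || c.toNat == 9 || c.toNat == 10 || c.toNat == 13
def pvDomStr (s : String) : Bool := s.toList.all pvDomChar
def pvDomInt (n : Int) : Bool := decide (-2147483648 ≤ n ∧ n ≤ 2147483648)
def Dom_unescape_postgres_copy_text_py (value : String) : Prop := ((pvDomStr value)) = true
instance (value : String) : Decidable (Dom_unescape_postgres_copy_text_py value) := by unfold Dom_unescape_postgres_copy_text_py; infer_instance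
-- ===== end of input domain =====

-- B scans chunkwise (bulk-copy the run up to the next backslash, then decode one escape) instead of A's per-character index loop; same values on all inputs (constant-factor speedup measured).

-- ===== PORT A =====
def pvIsOctA (c : Char) : Bool := "01234567".toList.contains c

def pvOctValA (ds : List Char) : Char :=
  Char.ofNat (ds.foldl (fun a c => a * 8 + (c.toNat - 48)) 0)

def pvMapA : PySem.Dict Char Char :=
  PySem.Dict.ofList [('b', Char.ofNat 8), ('f', Char.ofNat 12), ('n', Char.ofNat 10),
   ('r', Char.ofNat 13), ('t', Char.ofNat 9), ('v', Char.ofNat 11), ('\\', '\\')]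

-- A's while-loop over the index, written as structural recursion on the remaining chars
def pvRunA : List Char → List Char
  | [] => []
  | c :: rest =>
    if c ≠ '\\' then c :: pvRunA rest
    else
      match rest with
      | [] => ['\\']
      | e :: rest2 =>
        if pvIsOctA e then
          -- the 'for offset in range(1, 3)' octal-digit collection, unrolled as A performs it
          let ds : List Char :=
            match rest2 with
            | [] => [e]
            | d1 :: rest3 =>
              if pvIsOctA d1 then
                match rest3 with
                | [] => [e, d1]
                | d2 :: _ => if pvIsOctA d2 then [e, d1, d2] else [e, d1]
              else [e]
          pvOctValA ds :: pvRunA (rest2.drop (ds.length - 1))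
        else PySem.Dict.getD pvMapA e e :: pvRunA rest2
termination_by cs => cs.length
decreasing_by
  all_goals simp [List.length_drop] <;> omega

def unescape_postgres_copy_text_py (value : String) : String :=
  String.ofList (pvRunA value.toList)

-- ===== PORT B =====
def pvIsOctB (c : Char) : Bool := c ∈ ['0', '1', '2', '3', '4', '5', '6', '7']

def pvOctValB (ds : List Char) : Char :=
  Char.ofNat (ds.foldl (fun a c => a * 8 + (c.toNat - 48)) 0)

def pvMapB : PySem.Dict Char Char :=
  PySem.Dict.ofList [('b', Char.ofNat 8), ('f', Char.ofNat 12), ('n', Char.ofNat 10),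
   ('r', Char.ofNat 13), ('t', Char.ofNat 9), ('v', Char.ofNat 11), ('\\', '\\')]

-- B's chunkwise loop: copy the run before the next backslash, decode one escape, recurse
def pvRunB (cs : List Char) : List Char :=
  let pre := cs.takeWhile (· ≠ '\\')
  let suf := cs.dropWhile (· ≠ '\\')
  if suf.isEmpty then pre
  else
    let rest := suf.tail
    let ds := (rest.take 3).takeWhile pvIsOctB
    pre ++
      (if ds.isEmpty then
        if rest.isEmpty then ['\\']
        -- rest[0]: rest is nonempty on this branch, so the headD default is never read
        else PySem.Dict.getD pvMapB (rest.headD '\\') (rest.headD '\\') :: pvRunB rest.tail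
      else pvOctValB ds :: pvRunB (rest.drop ds.length))
termination_by cs.length
decreasing_by
  · rename_i hsuf hds hrest
    have h2 : 0 < suf.length := by
      cases h : suf with
      | nil => exact absurd (by simp [h]) hsuf
      | cons a l => simp [h]
    have h2' : 0 < (List.dropWhile (fun x => decide (x ≠ '\\')) cs).length := h2
    have hle := List.length_dropWhile_le (p := fun x => decide (x ≠ '\\')) (l := cs)
    simp only [List.length_tail]
    omega
  · rename_i hsuf hds
    have h2 : 0 < suf.length := by
      cases h : suf with
      | nil => exact absurd (by simp [h]) hsuf
      | cons a l => simp [h]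
    have h2' : 0 < (List.dropWhile (fun x => decide (x ≠ '\\')) cs).length := h2
    have hle := List.length_dropWhile_le (p := fun x => decide (x ≠ '\\')) (l := cs)
    simp only [List.length_drop, List.length_tail]
    omega

def unescape_postgres_copy_text_py_alt (value : String) : String :=
  String.ofList (pvRunB value.toList)

-- ===== PRECONDITION & SPEC =====
def Spec_unescape_postgres_copy_text_py (value : String) (out : String) : Prop := out = unescape_postgres_copy_text_py_alt value
instance (value : String) (out : String) : Decidable (Spec_unescape_postgres_copy_text_py value out) := by unfold Spec_unescape_postgres_copy_text_py; infer_instance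

-- ===== CLAIM (what is proved, stated in full; the proofs are below) =====
def Claim_equal_unescape_postgres_copy_text_py : Prop := ∀ (value : String), Dom_unescape_postgres_copy_text_py value → Spec_unescape_postgres_copy_text_py value (unescape_postgres_copy_text_py value)

-- ===== LEMMAS AND PROOFS =====

theorem pvRunB_cons_ne (c : Char) (cs : List Char) (hc : c ≠ '\\') :
    pvRunB (c :: cs) = c :: pvRunB cs := by
  rw [pvRunB, pvRunB]
  simp only [List.takeWhile_cons, List.dropWhile_cons, hc, ne_eq, not_false_eq_true,
    decide_true, Bool.not_false, if_true]
  split <;> simp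

theorem pvRunA_cons_ne (c : Char) (cs : List Char) (hc : c ≠ '\\') :
    pvRunA (c :: cs) = c :: pvRunA cs := by
  rw [pvRunA.eq_def]
  simp [hc]

theorem pvRunA_nil : pvRunA [] = [] := by rw [pvRunA.eq_def]

theorem pvRunB_nil : pvRunB [] = [] := by rw [pvRunB]; simp

theorem pvIsOct_eq (c : Char) : pvIsOctB c = pvIsOctA c := by
  simp [pvIsOctA, pvIsOctB]

theorem pvRunA_eq_pvRunB : ∀ (n : Nat) (cs : List Char), cs.length ≤ n → pvRunA cs = pvRunB cs := by
  intro n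
  induction n with
  | zero =>
    intro cs h
    have : cs = [] := by cases cs <;> simp_all
    subst this
    rw [pvRunA_nil, pvRunB_nil]
  | succ n ih =>
    intro cs hlen
    match cs with
    | [] => rw [pvRunA_nil, pvRunB_nil]
    | c :: rest =>
      by_cases hc : c = '\\'
      · subst hc
        rw [pvRunA.eq_def, pvRunB]
        simp only [ne_eq, not_true_eq_false, if_false, List.takeWhile_cons,
          List.dropWhile_cons, decide_true, decide_false, Bool.not_true, decide_not]
        match rest with
        | [] => simp
        | e :: rest2 =>
          by_cases he : pvIsOctA e
          · have heB : pvIsOctB e = true := by rw [pvIsOct_eq]; exact he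
            simp only [he, if_true]
            match rest2 with
            | [] =>
              simp [List.take, List.takeWhile, heB, pvOctValA, pvOctValB, pvRunA_nil, pvRunB_nil]
            | d1 :: rest3 =>
              by_cases hd1 : pvIsOctA d1
              · have hd1B : pvIsOctB d1 = true := by rw [pvIsOct_eq]; exact hd1
                match rest3 with
                | [] =>
                  simp [hd1, List.take, List.takeWhile, heB, hd1B, pvOctValA, pvOctValB,
                    pvRunA_nil, pvRunB_nil]
                | d2 :: rest4 =>
                  by_cases hd2 : pvIsOctA d2
                  · have hd2B : pvIsOctB d2 = true := by rw [pvIsOct_eq]; exact hd2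
                    simp only [hd1, hd2, if_true]
                    simp [List.take, List.takeWhile, heB, hd1B, hd2B, pvOctValA, pvOctValB]
                    exact ih rest4 (by simp at hlen ⊢; omega)
                  · have hd2B : pvIsOctB d2 = false := by rw [pvIsOct_eq]; simpa using hd2
                    simp only [hd1, hd2, if_true, if_false]
                    simp [List.take, List.takeWhile, heB, hd1B, hd2B, pvOctValA, pvOctValB]
                    exact ih (d2 :: rest4) (by simp at hlen ⊢; omega)
              · have hd1B : pvIsOctB d1 = false := by rw [pvIsOct_eq]; simpa using hd1
                simp [hd1, List.take, List.takeWhile, heB, hd1B, pvOctValA, pvOctValB]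
                exact ih (d1 :: rest3) (by simp at hlen ⊢; omega)
          · have heB : pvIsOctB e = false := by rw [pvIsOct_eq]; simpa using he
            simp [he, List.take, List.takeWhile, heB, pvMapA, pvMapB]
            exact ih rest2 (by simp at hlen ⊢; omega)
      · rw [pvRunA_cons_ne c rest hc, pvRunB_cons_ne c rest hc]
        rw [ih rest (by simp at hlen; omega)]

-- ===== VERDICT (by name: the statement is the Claim_ definition above) =====
theorem unescape_postgres_copy_text_py_spec : Claim_equal_unescape_postgres_copy_text_py := by
  intro value _
  unfold Spec_unescape_postgres_copy_text_py unescape_postgres_copy_text_py unescape_postgres_copy_text_py_alt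
  rw [pvRunA_eq_pvRunB value.toList.length value.toList le_rfl]
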